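-- pv_equiv track=rewrite | github.com/talsag-dev/Algorithms | Policemen_catch_thieves.py | Catch_thieves
-- ===== SOURCE A (Python) =====
-- def Catch_thieves(arr:list,k:int)->int:
--     police_index = []
--     thieves_index = []
--
--     for i in range(len(arr)):
--         if arr[i]=='T':
--             thieves_index.append(i)
--         else:
--             police_index.append(i)
--
--     res,t,p =0,0,0
--     while t<len(thieves_index) and p<len(police_index):
--         if abs(thieves_index[t]-police_index[p])<=k:
--             res+=1
--             t+=1
--             p+=1
--
--         elif thieves_index[t]<police_index[p]:
--             t+=1
--         else:
--             p+=1
--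
--     return res
-- ===== SOURCE B (Python) =====
-- def Catch_thieves(arr: list, k: int) -> int:
--     # Single left-to-right pass keeping FIFO queues of unmatched police/thief indices.
--     police = []
--     thieves = []
--     res = 0
--     for i, c in enumerate(arr):
--         cur, opp = (thieves, police) if c == 'T' else (police, thieves)
--         while opp and i - opp[0] > k:
--             opp.pop(0)
--         if opp:
--             opp.pop(0)
--             res += 1
--         else:
--             cur.append(i)
--     return res
-- ===== Notes on version B (the rewrite author's own statement) =====
-- stated objective: alternative
-- what changed: Replaces A's two-phase build-index-lists-then-two-pointer-merge with a single left-to-right pass over arr that maintains FIFO queues of unmatched police/thief indices, purging fronts more than k away and matching on arrival.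
import Mathlib
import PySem

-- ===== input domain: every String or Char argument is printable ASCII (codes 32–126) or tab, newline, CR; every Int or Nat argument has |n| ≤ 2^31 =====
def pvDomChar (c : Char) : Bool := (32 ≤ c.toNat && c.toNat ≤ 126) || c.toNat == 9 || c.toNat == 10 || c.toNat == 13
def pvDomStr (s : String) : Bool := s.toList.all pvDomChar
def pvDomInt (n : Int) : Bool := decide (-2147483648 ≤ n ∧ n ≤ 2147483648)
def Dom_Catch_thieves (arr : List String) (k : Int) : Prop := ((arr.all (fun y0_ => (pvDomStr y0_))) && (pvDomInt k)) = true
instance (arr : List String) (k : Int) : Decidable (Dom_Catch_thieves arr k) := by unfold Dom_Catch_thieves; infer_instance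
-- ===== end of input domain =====

-- B replaces A's build-two-index-lists-then-two-pointer-merge by a single pass over arr
-- that maintains FIFO queues of unmatched indices (objective: alternative, same O(n) cost).

-- ===== PORT A =====
-- the while loop: the two pointers t,p are ported as the remaining suffixes of the index lists
def aLoop (k : Int) : List Int → List Int → Int → Int
  | [], _, res => res
  | _, [], res => res
  | t :: ts, p :: ps, res =>
      if |t - p| ≤ k then aLoop k ts ps (res + 1)
      else if t < p then aLoop k ts (p :: ps) res
      else aLoop k (t :: ts) ps res
  termination_by ts ps _ => ts.length + ps.length

-- the index-building for-loop (i runs over range(len(arr)), reading arr[i]): ported as a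
-- traversal with the running index i; state = (police_index, thieves_index)
def buildA : List String → Int → List Int × List Int → List Int × List Int
  | [], _, st => st
  | c :: rest, i, st =>
      if c = "T" then buildA rest (i + 1) (st.1, st.2 ++ [i])
      else buildA rest (i + 1) (st.1 ++ [i], st.2)

def Catch_thieves (arr : List String) (k : Int) : Int :=
  let st := buildA arr 0 ([], [])
  aLoop k st.2 st.1 0

-- ===== PORT B =====
-- the inner while loop: pop stale front indices (more than k before i)
def purgeQ (k i : Int) : List Int → List Int
  | [] => []
  | x :: xs => if k < i - x then purgeQ k i xs else x :: xs

-- the single pass: state = (current index i, police queue, thieves queue, res)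
def bLoop (k : Int) : List String → Int → List Int → List Int → Int → Int
  | [], _, _, _, res => res
  | c :: rest, i, police, thieves, res =>
      if c = "T" then
        match purgeQ k i police with
        | [] => bLoop k rest (i + 1) [] (thieves ++ [i]) res
        | _ :: ps => bLoop k rest (i + 1) ps thieves (res + 1)
      else
        match purgeQ k i thieves with
        | [] => bLoop k rest (i + 1) (police ++ [i]) [] res
        | _ :: ts => bLoop k rest (i + 1) police ts (res + 1)

def Catch_thieves_alt (arr : List String) (k : Int) : Int :=
  bLoop k arr 0 [] [] 0

-- ===== PRECONDITION & SPEC =====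
def Spec_Catch_thieves (arr : List String) (k : Int) (out : Int) : Prop := out = Catch_thieves_alt arr k
instance (arr : List String) (k : Int) (out : Int) : Decidable (Spec_Catch_thieves arr k out) := by unfold Spec_Catch_thieves; infer_instance

-- ===== CLAIM (what is proved, stated in full; the proofs are below) =====
def Claim_equal_Catch_thieves : Prop := ∀ (arr : List String) (k : Int), Dom_Catch_thieves arr k → Spec_Catch_thieves arr k (Catch_thieves arr k)

-- ===== LEMMAS AND PROOFS =====

-- thief indices (chars equal to "T") of a suffix starting at index i
def fT : List String → Int → List Int
  | [], _ => []
  | c :: rest, i => if c = "T" then i :: fT rest (i + 1) else fT rest (i + 1)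

-- police indices of a suffix starting at index i
def fP : List String → Int → List Int
  | [], _ => []
  | c :: rest, i => if c = "T" then fP rest (i + 1) else i :: fP rest (i + 1)

theorem buildA_spec : ∀ (rest : List String) (i : Int) (ps ts : List Int),
    buildA rest i (ps, ts) = (ps ++ fP rest i, ts ++ fT rest i) := by
  intro rest
  induction rest with
  | nil => intro i ps ts; simp [buildA, fP, fT]
  | cons c rest ih =>
      intro i ps ts
      by_cases h : c = "T" <;> simp [buildA, fP, fT, h, ih]

theorem aLoop_skipT (k : Int) : ∀ (q0 ts ps : List Int) (i res : Int),
    (∀ x ∈ q0, x < i ∧ k < i - x) →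
    aLoop k (q0 ++ ts) (i :: ps) res = aLoop k ts (i :: ps) res := by
  intro q0
  induction q0 with
  | nil => intro ts ps i res _; rfl
  | cons x q0 ih =>
      intro ts ps i res h
      have hx := h x (by simp)
      have habs : ¬ |x - i| ≤ k := by
        rw [abs_sub_comm, abs_of_pos (by omega)]
        omega
      simp only [List.cons_append, aLoop, habs, if_false, if_pos hx.1]
      exact ih ts ps i res (fun y hy => h y (by simp [hy]))

theorem aLoop_skipP (k : Int) : ∀ (q0 ps ts : List Int) (i res : Int),
    (∀ x ∈ q0, x < i ∧ k < i - x) →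
    aLoop k (i :: ts) (q0 ++ ps) res = aLoop k (i :: ts) ps res := by
  intro q0
  induction q0 with
  | nil => intro ps ts i res _; rfl
  | cons x q0 ih =>
      intro ps ts i res h
      have hx := h x (by simp)
      have habs : ¬ |i - x| ≤ k := by
        rw [abs_of_pos (by omega)]; omega
      have hlt : ¬ i < x := by omega
      simp only [List.cons_append, aLoop, habs, if_false, hlt]
      exact ih ps ts i res (fun y hy => h y (by simp [hy]))

theorem purgeQ_spec (k i : Int) : ∀ (q : List Int),
    ∃ q0, q = q0 ++ purgeQ k i q ∧ (∀ x ∈ q0, k < i - x) := by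
  intro q
  induction q with
  | nil => exact ⟨[], by simp [purgeQ]⟩
  | cons x xs ih =>
      by_cases h : k < i - x
      · obtain ⟨q0, hq, hall⟩ := ih
        refine ⟨x :: q0, ?_, ?_⟩
        · simp [purgeQ, h]; exact hq
        · intro y hy; rcases List.mem_cons.mp hy with rfl | hy
          · exact h
          · exact hall y hy
      · exact ⟨[], by simp [purgeQ, h]⟩

theorem purgeQ_head (k i : Int) : ∀ (q : List Int) (t : Int) (ts : List Int),
    purgeQ k i q = t :: ts → i - t ≤ k := by
  intro q
  induction q with
  | nil => intro t ts h; simp [purgeQ] at h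
  | cons x xs ih =>
      intro t ts h
      by_cases hx : k < i - x
      · simp [purgeQ, hx] at h; exact ih t ts h
      · simp [purgeQ, hx] at h; omega

-- main invariant: a single-pass state with one empty queue and leftover queue q
-- (strictly increasing, all below i) computes exactly A's two-pointer result on
-- q prepended to the future indices.
theorem mainInv (k : Int) : ∀ (rest : List String) (i : Int) (q : List Int) (res : Int),
    q.Pairwise (· < ·) → (∀ x ∈ q, x < i) →
    (bLoop k rest i [] q res = aLoop k (q ++ fT rest i) (fP rest i) res ∧
     bLoop k rest i q [] res = aLoop k (fT rest i) (q ++ fP rest i) res) := by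
  intro rest
  induction rest with
  | nil =>
      intro i q res _ _
      constructor
      · show res = aLoop k (q ++ []) [] res
        cases q <;> simp [aLoop]
      · show res = aLoop k [] (q ++ []) res
        simp [aLoop]
  | cons c rest ih =>
      intro i q res hsort hlt
      have hq1 : (q ++ [i]).Pairwise (· < ·) := by
        rw [List.pairwise_append]
        exact ⟨hsort, List.pairwise_singleton _ _, by intro a ha b hb; simp at hb; subst hb; exact hlt a ha⟩
      have hlt1 : ∀ x ∈ q ++ [i], x < i + 1 := by
        intro x hx; rcases List.mem_append.mp hx with h | h
        · have := hlt x h; omega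
        · simp at h; omega
      have hltq : ∀ x ∈ q, x < i + 1 := fun x hx => by have := hlt x hx; omega
      obtain ⟨q0, hdec, hstale⟩ := purgeQ_spec k i q
      have hq0 : ∀ x ∈ q0, x < i ∧ k < i - x := by
        intro x hx
        exact ⟨hlt x (hdec ▸ List.mem_append.mpr (Or.inl hx)), hstale x hx⟩
      constructor
      · -- thieves-queue form
        by_cases hc : c = "T"
        · -- enqueue thief
          simp only [bLoop, hc, if_pos, purgeQ]
          have := (ih (i + 1) (q ++ [i]) res hq1 hlt1).1
          rw [this]
          simp [fT, fP]
        · -- police arrives: purge thief queue, match or enqueue police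
          simp only [bLoop, if_neg hc]
          cases hp : purgeQ k i q with
          | nil =>
              have := (ih (i + 1) [i] res (List.pairwise_singleton _ _) (by simp)).2
              show bLoop k rest (i + 1) [i] [] res = _
              rw [this]
              have hq0' : q = q0 := by simpa [hp] using hdec
              simp only [fT, fP, if_neg hc]
              rw [hq0']
              exact (aLoop_skipT k q0 (fT rest (i+1)) (fP rest (i+1)) i res (hq0' ▸ hq0)).symm
          | cons t ts =>
              have hts : (t :: ts).Pairwise (· < ·) := by
                have : (t :: ts).Sublist q := hdec ▸ hp ▸ (List.sublist_append_right q0 _)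
                exact hsort.sublist this
              have htsm : ∀ x ∈ t :: ts, x < i + 1 := by
                intro x hx
                have : x ∈ q := hdec ▸ hp ▸ List.mem_append.mpr (Or.inr hx)
                have := hlt x this; omega
              have := (ih (i + 1) ts (res + 1) (hts.sublist (List.sublist_cons_self t ts))
                (fun x hx => htsm x (List.mem_cons_of_mem t hx))).1
              show bLoop k rest (i + 1) [] ts (res + 1) = _
              rw [this]
              have hhead : i - t ≤ k := purgeQ_head k i q t ts hp
              have htlti : t < i := hlt t (hdec ▸ hp ▸ List.mem_append.mpr (Or.inr (by simp)))
              simp only [fT, fP, if_neg hc]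
              rw [hdec, hp, List.append_assoc]
              rw [aLoop_skipT k q0 _ _ i res hq0]
              have habs : |t - i| ≤ k := by
                rw [abs_sub_comm, abs_of_pos (by omega)]; omega
              simp [aLoop, habs]
      · -- police-queue form (symmetric)
        by_cases hc : c = "T"
        · -- thief arrives: purge police queue, match or enqueue thief
          simp only [bLoop, hc, if_pos]
          cases hp : purgeQ k i q with
          | nil =>
              have := (ih (i + 1) [i] res (List.pairwise_singleton _ _) (by simp)).1
              show bLoop k rest (i + 1) [] [i] res = _
              rw [this]
              have hq0' : q = q0 := by simpa [hp] using hdec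
              simp only [fT, fP, if_pos]
              rw [hq0']
              exact (aLoop_skipP k q0 (fP rest (i+1)) (fT rest (i+1)) i res (hq0' ▸ hq0)).symm
          | cons p ps =>
              have hts : (p :: ps).Pairwise (· < ·) := by
                have : (p :: ps).Sublist q := hdec ▸ hp ▸ (List.sublist_append_right q0 _)
                exact hsort.sublist this
              have htsm : ∀ x ∈ p :: ps, x < i + 1 := by
                intro x hx
                have : x ∈ q := hdec ▸ hp ▸ List.mem_append.mpr (Or.inr hx)
                have := hlt x this; omega
              have := (ih (i + 1) ps (res + 1) (hts.sublist (List.sublist_cons_self p ps))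
                (fun x hx => htsm x (List.mem_cons_of_mem p hx))).2
              show bLoop k rest (i + 1) ps [] (res + 1) = _
              rw [this]
              have hhead : i - p ≤ k := purgeQ_head k i q p ps hp
              have hplti : p < i := hlt p (hdec ▸ hp ▸ List.mem_append.mpr (Or.inr (by simp)))
              simp only [fT, fP, if_pos]
              rw [hdec, hp, List.append_assoc]
              rw [aLoop_skipP k q0 _ _ i res hq0]
              have habs : |i - p| ≤ k := by
                rw [abs_of_pos (by omega)]; omega
              simp [aLoop, habs]
        · -- enqueue police
          simp only [bLoop, if_neg hc, purgeQ]
          have := (ih (i + 1) (q ++ [i]) res hq1 hlt1).2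
          rw [this]
          simp [fT, fP, hc]

-- ===== VERDICT (by name: the statement is the Claim_ definition above) =====
theorem Catch_thieves_spec : Claim_equal_Catch_thieves := by
  intro arr k _
  show Catch_thieves arr k = Catch_thieves_alt arr k
  unfold Catch_thieves Catch_thieves_alt
  rw [buildA_spec]
  have := (mainInv k arr 0 [] 0 (List.Pairwise.nil) (by simp)).1
  simp at this ⊢
  exact this.symm
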